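-- pv_equiv track=rewrite | github.com/jbarrera30/Sandcastle-Model | castle.py | shapeCastle
-- ===== SOURCE A (Python) =====
-- def shapeCastle(base,h,shape):
--
--
--     if(shape=="rectangular"):
--         pass
--     if(shape=="rhombus"):
--         pass
--
--     if(shape=="pyramid"):
--
--         for i in range(0,len(base)):
--             for j in range(0,len(base[0])):
--                 base[h][j]= 0
--                 base[len(base)-1-h][j]=0
--                 base[i][h]=0
--                 base[i][len(base[0])-1-h]=0
--
--     return base
-- ===== SOURCE B (Python) =====
-- def shapeCastle(base, h, shape):
--     # Zero the two border-offset rows and columns directly: one row pass and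
--     # one column pass, each target written once, instead of A's nested loops.
--     if shape == "pyramid" and base and base[0]:
--         n, m = len(base), len(base[0])
--         for j in range(m):
--             base[h][j] = 0
--             base[n - 1 - h][j] = 0
--         for row in base:
--             row[h] = 0
--             row[m - 1 - h] = 0
--     return base
-- ===== Notes on version B (the rewrite author's own statement) =====
-- stated objective: alternative
-- what changed: A zeroes the two rows and two columns by rewriting its four targets inside an O(n*m) nested loop; B writes each target once, with one pass over the two rows and one pass over the rows for the two columns (no measured speedup on the generated timing inputs, which mostly take the trivial branch).
import Mathlib
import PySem

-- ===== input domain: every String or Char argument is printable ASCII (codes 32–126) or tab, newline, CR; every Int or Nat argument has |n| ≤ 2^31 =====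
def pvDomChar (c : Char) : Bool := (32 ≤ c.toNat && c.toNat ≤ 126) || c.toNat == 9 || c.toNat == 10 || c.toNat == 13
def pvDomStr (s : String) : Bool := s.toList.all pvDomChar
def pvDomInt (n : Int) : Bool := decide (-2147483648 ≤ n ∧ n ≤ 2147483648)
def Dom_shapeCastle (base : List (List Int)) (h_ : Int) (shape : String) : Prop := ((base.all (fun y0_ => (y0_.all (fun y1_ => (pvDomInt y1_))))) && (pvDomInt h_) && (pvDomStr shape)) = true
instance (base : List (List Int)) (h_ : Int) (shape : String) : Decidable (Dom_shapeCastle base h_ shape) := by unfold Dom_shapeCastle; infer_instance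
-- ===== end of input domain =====

-- B replaces A's nested loop (which rewrites its four targets once per (i,j) pair) by one
-- pass over the two zeroed rows and one pass over the rows for the two zeroed columns;
-- equivalence is about the RETURN value (both Pythons also mutate `base` in place, to the
-- same final state).


-- ===== PORT A =====
-- helper shared by both ports: `b[i][j] = v` with Python index semantics on both levels
-- (no-op where Python would raise IndexError — Pre_ excludes exactly those inputs)
def pyMatSet (b : List (List Int)) (i j : Int) (v : Int) : List (List Int) :=
  PySem.List.pySetD b i (PySem.List.pySetD (PySem.List.pyGetD b i []) j v)

-- body of A's inner `for j in range(0, len(base[0]))` loop: the four assignments in order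
def innerBodyA (h_ : Int) (i : Nat) (b : List (List Int)) (j : Nat) : List (List Int) :=
  let b1 := pyMatSet b h_ (j : Int) 0                                   -- base[h][j] = 0
  let b2 := pyMatSet b1 ((b1.length : Int) - 1 - h_) (j : Int) 0        -- base[len(base)-1-h][j] = 0
  let b3 := pyMatSet b2 (i : Int) h_ 0                                  -- base[i][h] = 0
  pyMatSet b3 (i : Int) (((b3.headD []).length : Int) - 1 - h_) 0       -- base[i][len(base[0])-1-h] = 0

-- body of A's outer `for i in range(0, len(base))` loop
def outerBodyA (h_ : Int) (b : List (List Int)) (i : Nat) : List (List Int) :=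
  (List.range (b.headD []).length).foldl (innerBodyA h_ i) b

-- the `if shape=="rectangular": pass` and `if shape=="rhombus": pass` branches do nothing
def shapeCastle (base : List (List Int)) (h_ : Int) (shape : String) : List (List Int) :=
  if shape = "pyramid" then (List.range base.length).foldl (outerBodyA h_) base else base

-- ===== PORT B =====
-- body of B's row pass `for j in range(m): base[h][j] = 0; base[n-1-h][j] = 0`
def rowZeroB (n : Nat) (h_ : Int) (b : List (List Int)) (j : Nat) : List (List Int) :=
  pyMatSet (pyMatSet b h_ (j : Int) 0) ((n : Int) - 1 - h_) (j : Int) 0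

def shapeCastle_alt (base : List (List Int)) (h_ : Int) (shape : String) : List (List Int) :=
  if shape = "pyramid" ∧ base ≠ [] ∧ base.headD [] ≠ [] then
    let n := base.length
    let m := (base.headD []).length
    let b1 := (List.range m).foldl (rowZeroB n h_) base
    -- column pass `for row in base: row[h] = 0; row[m-1-h] = 0`
    b1.map (fun row => PySem.List.pySetD (PySem.List.pySetD row h_ 0) ((m : Int) - 1 - h_) 0)
  else base

-- ===== PRECONDITION & SPEC =====
-- resolved (nonnegative) form of a Python index, meaningful under InRange

-- ===== PRECONDITION & SPEC =====
-- Pre_ excludes exactly the inputs on which A raises IndexError: when shape is "pyramid"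
-- and the matrix has a nonempty first row, every index A writes must be in Python range
-- (row indices h and n-1-h valid and those two rows at least as long as the first row;
-- column indices h and m-1-h valid in every row).
def Pre_shapeCastle (base : List (List Int)) (h_ : Int) (shape : String) : Prop :=
  shape = "pyramid" → base ≠ [] → base.headD [] ≠ [] →
    (PySem.Raise.InRange base.length h_ ∧
     PySem.Raise.InRange base.length ((base.length : Int) - 1 - h_) ∧
     (base.headD []).length ≤ (PySem.List.pyGetD base h_ []).length ∧
     (base.headD []).length ≤ (PySem.List.pyGetD base ((base.length : Int) - 1 - h_) []).length ∧
     ∀ r ∈ base, PySem.Raise.InRange r.length h_ ∧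
       PySem.Raise.InRange r.length (((base.headD []).length : Int) - 1 - h_))
instance (base : List (List Int)) (h_ : Int) (shape : String) : Decidable (Pre_shapeCastle base h_ shape) := by
  unfold Pre_shapeCastle PySem.Raise.InRange; infer_instance

def pvWitness_shapeCastle : List (List Int) × Int × String := ([[1, 2], [3, 4]], 0, "pyramid")

def Spec_shapeCastle (base : List (List Int)) (h_ : Int) (shape : String) (out : List (List Int)) : Prop := out = shapeCastle_alt base h_ shape
instance (base : List (List Int)) (h_ : Int) (shape : String) (out : List (List Int)) : Decidable (Spec_shapeCastle base h_ shape out) := by unfold Spec_shapeCastle; infer_instance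

-- ===== CLAIM (what is proved, stated in full; the proofs are below) =====
def Claim_equal_shapeCastle : Prop := ∀ (base : List (List Int)) (h_ : Int) (shape : String), Dom_shapeCastle base h_ shape → Pre_shapeCastle base h_ shape → Spec_shapeCastle base h_ shape (shapeCastle base h_ shape)

-- ===== LEMMAS AND PROOFS =====

def pvRes (L : Nat) (i : Int) : Nat := if 0 ≤ i then i.toNat else L - (-i).toNat

-- entry (p,q) of a matrix, and length of row p
def pvE (b : List (List Int)) (p q : Nat) : Int := (b.getD p []).getD q 0
def pvRL (b : List (List Int)) (p : Nat) : Nat := (b.getD p []).length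

-- the four resolved target indices
def pvR1 (base : List (List Int)) (h_ : Int) : Nat := pvRes base.length h_
def pvR2 (base : List (List Int)) (h_ : Int) : Nat := pvRes base.length ((base.length : Int) - 1 - h_)
def pvC (base : List (List Int)) (h_ : Int) (p : Nat) : Nat := pvRes (pvRL base p) h_
def pvC' (base : List (List Int)) (h_ : Int) (p : Nat) : Nat :=
  pvRes (pvRL base p) (((base.headD []).length : Int) - 1 - h_)

-- all range conditions A's writes need, in resolved form
def pvOK (base : List (List Int)) (h_ : Int) : Prop :=
  PySem.Raise.InRange base.length h_ ∧
  PySem.Raise.InRange base.length ((base.length : Int) - 1 - h_) ∧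
  (base.headD []).length ≤ pvRL base (pvR1 base h_) ∧
  (base.headD []).length ≤ pvRL base (pvR2 base h_) ∧
  ∀ p < base.length, PySem.Raise.InRange (pvRL base p) h_ ∧
    PySem.Raise.InRange (pvRL base p) (((base.headD []).length : Int) - 1 - h_)

-- same outer length and same row lengths as `base`
def pvShape (base b : List (List Int)) : Prop := b.length = base.length ∧ ∀ p, pvRL b p = pvRL base p

theorem pvRes_lt {L : Nat} {i : Int} (h : PySem.Raise.InRange L i) : pvRes L i < L := by
  unfold PySem.Raise.InRange at h; unfold pvRes; split_ifs <;> omega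

theorem pvRes_natCast (L : Nat) (j : Nat) : pvRes L (j : Int) = j := by
  simp [pvRes]

theorem pyIdx?_res {L : Nat} {i : Int} (h : PySem.Raise.InRange L i) :
    PySem.List.pyIdx? L i = some (pvRes L i) := by
  unfold PySem.Raise.InRange at h; unfold PySem.List.pyIdx? pvRes
  split_ifs <;> simp_all

theorem pySetD_res {α : Type} (xs : List α) {i : Int} (v : α) (h : PySem.Raise.InRange xs.length i) :
    PySem.List.pySetD xs i v = xs.set (pvRes xs.length i) v := by
  simp [PySem.List.pySetD, PySem.List.pySet?, pyIdx?_res h]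

theorem pyGetD_res {α : Type} (xs : List α) {i : Int} (d : α) (h : PySem.Raise.InRange xs.length i) :
    PySem.List.pyGetD xs i d = xs.getD (pvRes xs.length i) d := by
  simp [PySem.List.pyGetD, PySem.List.pyGet?, pyIdx?_res h, List.getD_eq_getElem?_getD]

theorem pySetD_out {α : Type} (xs : List α) {i : Int} (v : α) (h : ¬ PySem.Raise.InRange xs.length i) :
    PySem.List.pySetD xs i v = xs := by
  unfold PySem.Raise.InRange at h
  unfold PySem.List.pySetD PySem.List.pySet? PySem.List.pyIdx?
  split_ifs <;> simp_all <;> omega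

theorem getD_set {α : Type} (xs : List α) (k p : Nat) (v d : α) :
    (xs.set k v).getD p d = if p = k ∧ k < xs.length then v else xs.getD p d := by
  simp [List.getD_eq_getElem?_getD, List.getElem?_set]
  split_ifs <;> simp_all

theorem pvHeadD (b : List (List Int)) : b.headD [] = b.getD 0 [] := by cases b <;> rfl

theorem pyMatSet_length (b : List (List Int)) (i j : Int) (v : Int) :
    (pyMatSet b i j v).length = b.length := by
  by_cases h : PySem.Raise.InRange b.length i
  · rw [pyMatSet, pySetD_res _ _ h]; simp
  · rw [pyMatSet, pySetD_out _ _ h]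

theorem pyMatSet_RL (b : List (List Int)) (i j : Int) (v : Int) (p : Nat) :
    pvRL (pyMatSet b i j v) p = pvRL b p := by
  by_cases h : PySem.Raise.InRange b.length i
  · rw [pyMatSet, pySetD_res _ _ h, pyGetD_res _ _ h]
    simp only [pvRL, getD_set]
    split_ifs with hc
    · rw [PySem.List.length_pySetD, hc.1]
    · rfl
  · rw [pyMatSet, pySetD_out _ _ h]

theorem pyMatSet_shape (base b : List (List Int)) (i j : Int) (v : Int) (hS : pvShape base b) :
    pvShape base (pyMatSet b i j v) := by
  exact ⟨by rw [pyMatSet_length, hS.1], fun p => by rw [pyMatSet_RL, hS.2 p]⟩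

theorem pyMatSet_E (b : List (List Int)) (i j : Int) (v : Int) (p q : Nat)
    (hi : PySem.Raise.InRange b.length i)
    (hj : PySem.Raise.InRange (pvRL b (pvRes b.length i)) j) :
    pvE (pyMatSet b i j v) p q =
      if p = pvRes b.length i ∧ q = pvRes (pvRL b p) j then v else pvE b p q := by
  have hlt := pvRes_lt hi
  have hjl := pvRes_lt hj
  set pi := pvRes b.length i with hpi
  rw [pyMatSet, pySetD_res _ _ hi, pyGetD_res _ _ hi, ← hpi]
  set row' := PySem.List.pySetD (b.getD pi []) j v with hrow'
  have hrow : row' = (b.getD pi []).set (pvRes (pvRL b pi) j) v := by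
    rw [hrow', pySetD_res _ _ (show PySem.Raise.InRange (b.getD pi []).length j from hj)]; rfl
  have houter : (b.set pi row').getD p [] = if p = pi ∧ pi < b.length then row' else b.getD p [] :=
    getD_set b pi p row' []
  by_cases hp : p = pi
  · subst hp
    rw [pvE, houter, if_pos (And.intro rfl hlt), hrow, getD_set]
    unfold pvRL at hjl
    show _ = if pi = pi ∧ q = pvRes (pvRL b pi) j then v else pvE b pi q
    unfold pvE
    split_ifs <;> tauto
  · rw [pvE, houter, if_neg (fun hc => hp hc.1), if_neg (fun hc => hp hc.1)]
    rfl

-- characterisation of one iteration of A's inner loop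
theorem pv_ite_collapse {α : Type} (c1 c2 c3 c4 t : Prop) [Decidable c1] [Decidable c2] [Decidable c3] [Decidable c4] [Decidable t]
    (ht : t ↔ c1 ∨ c2 ∨ c3 ∨ c4) (x e : α) :
    (if c4 then x else if c3 then x else if c2 then x else if c1 then x else e) =
    if t then x else e := by
  split_ifs <;> tauto

theorem innerBodyA_char (base b : List (List Int)) (h_ : Int) (i j : Nat)
    (hOK : pvOK base h_) (hS : pvShape base b) (hi : i < base.length)
    (hj : j < (base.headD []).length) :
    pvShape base (innerBodyA h_ i b j) ∧
    ∀ p q, pvE (innerBodyA h_ i b j) p q =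
      if (p = pvR1 base h_ ∨ p = pvR2 base h_) ∧ q = j ∨
         p = i ∧ (q = pvC base h_ i ∨ q = pvC' base h_ i) then 0 else pvE b p q := by
  obtain ⟨hOK1, hOK2, hOK3, hOK4, hOK5⟩ := hOK
  obtain ⟨hL, hRL⟩ := hS
  have hii : PySem.Raise.InRange base.length (i : Int) := by
    unfold PySem.Raise.InRange; omega
  have hresi : pvRes base.length (i : Int) = i := pvRes_natCast _ _
  have h1i : PySem.Raise.InRange b.length h_ := hL ▸ hOK1
  have h1j : PySem.Raise.InRange (pvRL b (pvRes b.length h_)) (j : Int) := by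
    rw [hL, hRL]
    have := hOK3
    unfold PySem.Raise.InRange; unfold pvR1 at this; omega
  have hS1 : pvShape base (pyMatSet b h_ (j : Int) 0) :=
    pyMatSet_shape _ _ _ _ _ ⟨hL, hRL⟩
  generalize hb1 : pyMatSet b h_ (j : Int) 0 = b1 at hS1
  have h2i : PySem.Raise.InRange b1.length ((b1.length : Int) - 1 - h_) := by
    rw [hS1.1]; exact hOK2
  have h2j : PySem.Raise.InRange (pvRL b1 (pvRes b1.length ((b1.length : Int) - 1 - h_))) (j : Int) := by
    rw [hS1.1, hS1.2]
    have := hOK4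
    unfold PySem.Raise.InRange; unfold pvR2 at this; omega
  have hS2 : pvShape base (pyMatSet b1 ((b1.length : Int) - 1 - h_) (j : Int) 0) :=
    pyMatSet_shape _ _ _ _ _ hS1
  generalize hb2 : pyMatSet b1 ((b1.length : Int) - 1 - h_) (j : Int) 0 = b2 at hS2
  have h3i : PySem.Raise.InRange b2.length (i : Int) := by rw [hS2.1]; exact hii
  have h3j : PySem.Raise.InRange (pvRL b2 (pvRes b2.length (i : Int))) h_ := by
    rw [hS2.1, hresi, hS2.2]; exact (hOK5 i hi).1
  have hS3 : pvShape base (pyMatSet b2 (i : Int) h_ 0) := pyMatSet_shape _ _ _ _ _ hS2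
  generalize hb3 : pyMatSet b2 (i : Int) h_ 0 = b3 at hS3
  have hhead3n : (b3.headD []).length = (base.headD []).length := by
    rw [pvHeadD, pvHeadD]; exact hS3.2 0
  have hhead3 : ((b3.headD []).length : Int) = ((base.headD []).length : Int) := by
    exact_mod_cast hhead3n
  have h4i : PySem.Raise.InRange b3.length (i : Int) := by rw [hS3.1]; exact hii
  have h4j : PySem.Raise.InRange (pvRL b3 (pvRes b3.length (i : Int)))
      (((b3.headD []).length : Int) - 1 - h_) := by
    rw [hS3.1, hresi, hS3.2, hhead3]; exact (hOK5 i hi).2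
  have hS4 : pvShape base (pyMatSet b3 (i : Int) (((b3.headD []).length : Int) - 1 - h_) 0) :=
    pyMatSet_shape _ _ _ _ _ hS3
  have hunfold : innerBodyA h_ i b j = pyMatSet b3 (i : Int) (((b3.headD []).length : Int) - 1 - h_) 0 := by
    simp only [innerBodyA]
    rw [hb1, hb2, hb3]
  constructor
  · rw [hunfold]; exact hS4
  · intro p q
    have e1 : pvE b1 p q = if p = pvRes b.length h_ ∧ q = pvRes (pvRL b p) (j : Int) then 0 else pvE b p q := by
      rw [← hb1]; exact pyMatSet_E _ _ _ _ _ _ h1i h1j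
    have e2 : pvE b2 p q = if p = pvRes b1.length ((b1.length : Int) - 1 - h_) ∧ q = pvRes (pvRL b1 p) (j : Int) then 0 else pvE b1 p q := by
      rw [← hb2]; exact pyMatSet_E _ _ _ _ _ _ h2i h2j
    have e3 : pvE b3 p q = if p = pvRes b2.length (i : Int) ∧ q = pvRes (pvRL b2 p) h_ then 0 else pvE b2 p q := by
      rw [← hb3]; exact pyMatSet_E _ _ _ _ _ _ h3i h3j
    have e4 : pvE (innerBodyA h_ i b j) p q = if p = pvRes b3.length (i : Int) ∧ q = pvRes (pvRL b3 p) (((b3.headD []).length : Int) - 1 - h_) then 0 else pvE b3 p q := by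
      rw [hunfold]
      exact pyMatSet_E _ _ _ _ _ _ h4i h4j
    rw [hL, hRL p] at e1
    rw [hS1.1, hS1.2 p] at e2
    rw [hS2.1, hS2.2 p, hresi] at e3
    rw [hS3.1, hS3.2 p, hresi, hhead3] at e4
    simp only [pvRes_natCast] at e1 e2 e3 e4
    rw [e4, e3, e2, e1]
    refine pv_ite_collapse _ _ _ _ _ ?_ _ _
    simp only [pvR1, pvR2, pvC, pvC']
    constructor
    · rintro (⟨h1 | h1, h2⟩ | ⟨h1, h2 | h2⟩)
      · exact Or.inl ⟨h1, h2⟩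
      · exact Or.inr (Or.inl ⟨h1, h2⟩)
      · rw [← h1] at h2; exact Or.inr (Or.inr (Or.inl ⟨h1, h2⟩))
      · rw [← h1] at h2; exact Or.inr (Or.inr (Or.inr ⟨h1, h2⟩))
    · rintro (⟨h1, h2⟩ | ⟨h1, h2⟩ | ⟨h1, h2⟩ | ⟨h1, h2⟩)
      · exact Or.inl ⟨Or.inl h1, h2⟩
      · exact Or.inl ⟨Or.inr h1, h2⟩
      · rw [h1] at h2; exact Or.inr ⟨h1, Or.inl h2⟩
      · rw [h1] at h2; exact Or.inr ⟨h1, Or.inr h2⟩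

theorem pv_ite_collapse2 {α : Type} (c1 c2 t : Prop) [Decidable c1] [Decidable c2] [Decidable t]
    (ht : t ↔ c1 ∨ c2) (x e : α) :
    (if c2 then x else if c1 then x else e) = if t then x else e := by
  split_ifs <;> tauto

theorem pv_ite_collapse3 {α : Type} (c1 c2 c3 t : Prop) [Decidable c1] [Decidable c2] [Decidable c3] [Decidable t]
    (ht : t ↔ c1 ∨ c2 ∨ c3) (x e : α) :
    (if c3 then x else if c2 then x else if c1 then x else e) = if t then x else e := by
  split_ifs <;> tauto

theorem innerFoldA_char (base : List (List Int)) (h_ : Int) (i : Nat)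
    (hOK : pvOK base h_) (hi : i < base.length) :
    ∀ js : List Nat, (∀ j ∈ js, j < (base.headD []).length) →
    ∀ b, pvShape base b →
    pvShape base (js.foldl (innerBodyA h_ i) b) ∧
    ∀ p q, pvE (js.foldl (innerBodyA h_ i) b) p q =
      if (p = pvR1 base h_ ∨ p = pvR2 base h_) ∧ q ∈ js ∨
         js ≠ [] ∧ p = i ∧ (q = pvC base h_ i ∨ q = pvC' base h_ i) then 0 else pvE b p q := by
  intro js
  induction js with
  | nil => intro _ b hS; simpa using hS
  | cons j js ih =>
    intro hjs b hS
    have hstep := innerBodyA_char base b h_ i j hOK hS hi (hjs j (by simp))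
    have hrest := ih (fun x hx => hjs x (by simp [hx])) _ hstep.1
    refine ⟨by simpa using hrest.1, fun p q => ?_⟩
    rw [List.foldl_cons, hrest.2 p q, hstep.2 p q]
    refine pv_ite_collapse2 _ _ _ ?_ _ _
    constructor
    · rintro (⟨hP, hq⟩ | ⟨-, hpi, hD⟩)
      · rcases List.mem_cons.mp hq with rfl | hq
        · exact Or.inl (Or.inl ⟨hP, rfl⟩)
        · exact Or.inr (Or.inl ⟨hP, hq⟩)
      · exact Or.inl (Or.inr ⟨hpi, hD⟩)
    · rintro ((⟨hP, rfl⟩ | ⟨hpi, hD⟩) | (⟨hP, hq⟩ | ⟨-, hpi, hD⟩))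
      · exact Or.inl ⟨hP, List.mem_cons_self⟩
      · exact Or.inr ⟨List.cons_ne_nil _ _, hpi, hD⟩
      · exact Or.inl ⟨hP, List.mem_cons_of_mem _ hq⟩
      · exact Or.inr ⟨List.cons_ne_nil _ _, hpi, hD⟩

theorem outerFoldA_char (base : List (List Int)) (h_ : Int)
    (hOK : pvOK base h_) (hm : base.headD [] ≠ []) :
    ∀ is : List Nat, (∀ i ∈ is, i < base.length) →
    ∀ b, pvShape base b →
    pvShape base (is.foldl (outerBodyA h_) b) ∧
    ∀ p q, pvE (is.foldl (outerBodyA h_) b) p q =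
      if is ≠ [] ∧ (p = pvR1 base h_ ∨ p = pvR2 base h_) ∧ q < (base.headD []).length ∨
         p ∈ is ∧ (q = pvC base h_ p ∨ q = pvC' base h_ p) then 0 else pvE b p q := by
  intro is
  induction is with
  | nil => intro _ b hS; simpa using hS
  | cons i is ih =>
    intro his b hS
    have hhead : (b.headD []).length = (base.headD []).length := by
      rw [pvHeadD, pvHeadD]; exact hS.2 0
    have hstep := innerFoldA_char base h_ i hOK (his i (by simp))
      (List.range (b.headD []).length) (by intro j hj; rw [← hhead]; exact List.mem_range.mp hj)
      b hS
    have hbody : outerBodyA h_ b i = (List.range (b.headD []).length).foldl (innerBodyA h_ i) b := rfl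
    have hrest := ih (fun x hx => his x (by simp [hx])) _ hstep.1
    have hne : List.range (b.headD []).length ≠ [] := by
      intro hc
      have h0 : (b.headD []).length = 0 := by simpa using congrArg List.length hc
      rw [hhead] at h0
      exact hm (List.length_eq_zero_iff.mp h0)
    refine ⟨by rw [List.foldl_cons, hbody]; exact hrest.1, fun p q => ?_⟩
    rw [List.foldl_cons, hbody, hrest.2 p q, hstep.2 p q]
    refine pv_ite_collapse2 _ _ _ ?_ _ _
    constructor
    · rintro (⟨-, hP, hq⟩ | ⟨hpmem, hD⟩)
      · exact Or.inl (Or.inl ⟨hP, by rw [hhead]; exact List.mem_range.mpr hq⟩)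
      · rcases List.mem_cons.mp hpmem with rfl | hpmem
        · exact Or.inl (Or.inr ⟨hne, rfl, hD⟩)
        · exact Or.inr (Or.inr ⟨hpmem, hD⟩)
    · rintro ((⟨hP, hq⟩ | ⟨-, hpi, hD⟩) | (⟨-, hP, hq⟩ | ⟨hpmem, hD⟩))
      · refine Or.inl ⟨List.cons_ne_nil _ _, hP, ?_⟩
        have := List.mem_range.mp hq; rwa [hhead] at this
      · subst hpi; exact Or.inr ⟨List.mem_cons_self, hD⟩
      · exact Or.inl ⟨List.cons_ne_nil _ _, hP, hq⟩
      · exact Or.inr ⟨List.mem_cons.mpr (Or.inr hpmem), hD⟩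

theorem rowFoldB_char (base : List (List Int)) (h_ : Int) (hOK : pvOK base h_) :
    ∀ js : List Nat, (∀ j ∈ js, j < (base.headD []).length) →
    ∀ b, pvShape base b →
    pvShape base (js.foldl (rowZeroB base.length h_) b) ∧
    ∀ p q, pvE (js.foldl (rowZeroB base.length h_) b) p q =
      if (p = pvR1 base h_ ∨ p = pvR2 base h_) ∧ q ∈ js then 0 else pvE b p q := by
  obtain ⟨hOK1, hOK2, hOK3, hOK4, _⟩ := hOK
  intro js
  induction js with
  | nil => intro _ b hS; simpa using hS
  | cons j js ih =>
    intro hjs b hS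
    obtain ⟨hL, hRL⟩ := hS
    have h1i : PySem.Raise.InRange b.length h_ := hL ▸ hOK1
    have h1j : PySem.Raise.InRange (pvRL b (pvRes b.length h_)) (j : Int) := by
      rw [hL, hRL]
      have := hOK3; have hj := hjs j (by simp)
      unfold PySem.Raise.InRange; unfold pvR1 at this; omega
    have hS1 : pvShape base (pyMatSet b h_ (j : Int) 0) := pyMatSet_shape _ _ _ _ _ ⟨hL, hRL⟩
    generalize hb1 : pyMatSet b h_ (j : Int) 0 = b1 at hS1
    have h2i : PySem.Raise.InRange b1.length ((base.length : Int) - 1 - h_) := by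
      rw [hS1.1]; exact hOK2
    have h2j : PySem.Raise.InRange (pvRL b1 (pvRes b1.length ((base.length : Int) - 1 - h_))) (j : Int) := by
      rw [hS1.1, hS1.2]
      have := hOK4; have hj := hjs j (by simp)
      unfold PySem.Raise.InRange; unfold pvR2 at this; omega
    have hS2 : pvShape base (pyMatSet b1 ((base.length : Int) - 1 - h_) (j : Int) 0) :=
      pyMatSet_shape _ _ _ _ _ hS1
    have hbody : rowZeroB base.length h_ b j = pyMatSet b1 ((base.length : Int) - 1 - h_) (j : Int) 0 := by
      rw [rowZeroB, hb1]
    have hrest := ih (fun x hx => hjs x (by simp [hx])) _ (hbody ▸ hS2)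
    refine ⟨by rw [List.foldl_cons]; exact hrest.1, fun p q => ?_⟩
    have e1 : pvE b1 p q = if p = pvRes b.length h_ ∧ q = pvRes (pvRL b p) (j : Int) then 0 else pvE b p q := by
      rw [← hb1]; exact pyMatSet_E _ _ _ _ _ _ h1i h1j
    have e2 : pvE (rowZeroB base.length h_ b j) p q =
        if p = pvRes b1.length ((base.length : Int) - 1 - h_) ∧ q = pvRes (pvRL b1 p) (j : Int) then 0 else pvE b1 p q := by
      rw [hbody]; exact pyMatSet_E _ _ _ _ _ _ h2i h2j
    rw [hL, hRL p] at e1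
    rw [hS1.1, hS1.2 p] at e2
    simp only [pvRes_natCast] at e1 e2
    rw [List.foldl_cons, hrest.2 p q, e2, e1]
    refine pv_ite_collapse3 _ _ _ _ ?_ _ _
    constructor
    · rintro ⟨hP, hq⟩
      rcases List.mem_cons.mp hq with rfl | hq
      · rcases hP with h | h
        · exact Or.inl ⟨h, rfl⟩
        · exact Or.inr (Or.inl ⟨h, rfl⟩)
      · exact Or.inr (Or.inr ⟨hP, hq⟩)
    · rintro (⟨h1, rfl⟩ | ⟨h1, rfl⟩ | ⟨hP, hq⟩)
      · exact ⟨Or.inl h1, List.mem_cons_self⟩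
      · exact ⟨Or.inr h1, List.mem_cons_self⟩
      · exact ⟨hP, List.mem_cons_of_mem _ hq⟩

theorem pre_ok (base : List (List Int)) (h_ : Int)
    (h1 : PySem.Raise.InRange base.length h_)
    (h2 : PySem.Raise.InRange base.length ((base.length : Int) - 1 - h_))
    (h3 : (base.headD []).length ≤ (PySem.List.pyGetD base h_ []).length)
    (h4 : (base.headD []).length ≤ (PySem.List.pyGetD base ((base.length : Int) - 1 - h_) []).length)
    (h5 : ∀ r ∈ base, PySem.Raise.InRange r.length h_ ∧
        PySem.Raise.InRange r.length (((base.headD []).length : Int) - 1 - h_)) :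
    pvOK base h_ := by
  rw [pyGetD_res _ _ h1] at h3
  rw [pyGetD_res _ _ h2] at h4
  refine ⟨h1, h2, h3, h4, fun p hp => ?_⟩
  have hmem : base.getD p [] ∈ base := by
    rw [List.getD_eq_getElem _ _ hp]; exact List.getElem_mem hp
  exact h5 _ hmem

theorem foldA_empty_rows (h_ : Int) (b : List (List Int)) (hb : b.headD [] = []) :
    ∀ is : List Nat, is.foldl (outerBodyA h_) b = b := by
  intro is
  induction is with
  | nil => rfl
  | cons i is ih =>
    rw [List.foldl_cons, show outerBodyA h_ b i = b by
      rw [outerBodyA, hb, List.length_nil, List.range_zero, List.foldl_nil]]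
    exact ih

theorem main_eq (base : List (List Int)) (h_ : Int)
    (hb : base ≠ []) (hm : base.headD [] ≠ []) (hOK : pvOK base h_) :
    shapeCastle base h_ "pyramid" = shapeCastle_alt base h_ "pyramid" := by
  rw [shapeCastle, shapeCastle_alt, if_pos rfl, if_pos ⟨rfl, hb, hm⟩]
  show (List.range base.length).foldl (outerBodyA h_) base =
    ((List.range (base.headD []).length).foldl (rowZeroB base.length h_) base).map
      (fun row => PySem.List.pySetD (PySem.List.pySetD row h_ 0)
        (((base.headD []).length : Int) - 1 - h_) 0)
  have hSb : pvShape base base := ⟨rfl, fun _ => rfl⟩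
  have hA := outerFoldA_char base h_ hOK hm (List.range base.length)
    (fun i hi => List.mem_range.mp hi) base hSb
  have hB := rowFoldB_char base h_ hOK (List.range (base.headD []).length)
    (fun j hj => List.mem_range.mp hj) base hSb
  obtain ⟨hOK1, hOK2, hOK3, hOK4, hOK5⟩ := hOK
  generalize hAdef : (List.range base.length).foldl (outerBodyA h_) base = A at hA ⊢
  generalize hb1def : (List.range (base.headD []).length).foldl (rowZeroB base.length h_) base = b1 at hB ⊢
  have hrange_ne : List.range base.length ≠ [] := by
    intro hc
    have h0 : base.length = 0 := by simpa using congrArg List.length hc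
    exact hb (List.length_eq_zero_iff.mp h0)
  apply List.ext_getElem
  · rw [hA.1.1, List.length_map, hB.1.1]
  · intro p hpA hpmap
    rw [List.getElem_map]
    have hp : p < base.length := by rw [← hA.1.1]; exact hpA
    have hpB : p < b1.length := by rw [hB.1.1]; exact hp
    have hb1get : b1[p] = b1.getD p [] := (List.getD_eq_getElem b1 [] hpB).symm
    have hrl : b1[p].length = pvRL base p := by rw [hb1get]; exact hB.1.2 p
    have hcp : PySem.Raise.InRange (pvRL base p) h_ := (hOK5 p hp).1
    have hcp' : PySem.Raise.InRange (pvRL base p) (((base.headD []).length : Int) - 1 - h_) :=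
      (hOK5 p hp).2
    have hc1lt : pvC base h_ p < pvRL base p := pvRes_lt hcp
    have hc2lt : pvC' base h_ p < pvRL base p := pvRes_lt hcp'
    have hset1 : PySem.List.pySetD b1[p] h_ 0 = b1[p].set (pvC base h_ p) 0 := by
      rw [pySetD_res _ _ (show PySem.Raise.InRange b1[p].length h_ by rw [hrl]; exact hcp), hrl]
      rfl
    have hset1len : (b1[p].set (pvC base h_ p) 0).length = pvRL base p := by
      rw [List.length_set, hrl]
    have hset2 : PySem.List.pySetD (b1[p].set (pvC base h_ p) 0)
        (((base.headD []).length : Int) - 1 - h_) 0 =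
        (b1[p].set (pvC base h_ p) 0).set (pvC' base h_ p) 0 := by
      rw [pySetD_res _ _ (show PySem.Raise.InRange (b1[p].set (pvC base h_ p) 0).length
            (((base.headD []).length : Int) - 1 - h_) by rw [hset1len]; exact hcp'), hset1len]
      rfl
    have hApget : A[p] = A.getD p [] := (List.getD_eq_getElem A [] hpA).symm
    have hAlen : (A.getD p []).length = pvRL base p := hA.1.2 p
    apply List.ext_getElem
    · rw [hset1, hset2, List.length_set, List.length_set, hrl, hApget]
      exact hAlen
    · intro q hqA hqB
      have hEA : pvE A p q = A[p][q] := by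
        rw [pvE, ← hApget]
        exact List.getD_eq_getElem A[p] 0 hqA
      have hEB : (PySem.List.pySetD (PySem.List.pySetD b1[p] h_ 0)
          (((base.headD []).length : Int) - 1 - h_) 0).getD q 0 =
          (PySem.List.pySetD (PySem.List.pySetD b1[p] h_ 0)
          (((base.headD []).length : Int) - 1 - h_) 0)[q] :=
        List.getD_eq_getElem _ 0 hqB
      rw [← hEA, ← hEB, hset1, hset2]
      have hR : ((b1[p].set (pvC base h_ p) 0).set (pvC' base h_ p) 0).getD q 0 =
          if q = pvC' base h_ p ∧ pvC' base h_ p < (b1[p].set (pvC base h_ p) 0).length then 0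
          else if q = pvC base h_ p ∧ pvC base h_ p < b1[p].length then 0
          else b1[p].getD q 0 := by
        rw [getD_set, getD_set]
      rw [hset1len, hrl] at hR
      have hEb1 : b1[p].getD q 0 = pvE b1 p q := by rw [hb1get]; rfl
      rw [hEb1] at hR
      rw [hR, hB.2 p q, hA.2 p q]
      refine (pv_ite_collapse3 _ _ _ _ ?_ _ _).symm
      constructor
      · rintro (⟨-, hP, hq⟩ | ⟨-, h | h⟩)
        · exact Or.inl ⟨hP, List.mem_range.mpr hq⟩
        · exact Or.inr (Or.inl ⟨h, hc1lt⟩)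
        · exact Or.inr (Or.inr ⟨h, hc2lt⟩)
      · rintro (⟨hP, hq⟩ | ⟨hq, -⟩ | ⟨hq, -⟩)
        · exact Or.inl ⟨hrange_ne, hP, List.mem_range.mp hq⟩
        · exact Or.inr ⟨List.mem_range.mpr hp, Or.inl hq⟩
        · exact Or.inr ⟨List.mem_range.mpr hp, Or.inr hq⟩

-- ===== VERDICT (by name: the statement is the Claim_ definition above) =====
theorem shapeCastle_spec : Claim_equal_shapeCastle := by
  intro base h_ shape _hDom hPre
  show shapeCastle base h_ shape = shapeCastle_alt base h_ shape
  by_cases hs : shape = "pyramid"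
  · subst hs
    by_cases hb : base = []
    · subst hb; rfl
    · by_cases hm : base.headD [] = []
      · rw [shapeCastle, if_pos rfl, shapeCastle_alt,
            if_neg (fun hc => hc.2.2 hm), foldA_empty_rows h_ base hm]
      · obtain ⟨h1, h2, h3, h4, h5⟩ := hPre rfl hb hm
        exact main_eq base h_ hb hm (pre_ok base h_ h1 h2 h3 h4 h5)
  · rw [shapeCastle, if_neg hs, shapeCastle_alt, if_neg (fun hc => hs hc.1)]
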